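-- pv_equiv track=rewrite | github.com/cromz22/typical90 | 4_stars/001_yokan_party.py | general_bisect
-- ===== SOURCE A (Python) =====
-- def divide(m, diff):
--     """
--     Divide the yokan (`diff`) into `counter` pieces
--     so that the length of the shortest piece is `m`, except for the last one
--     """
--     length = 0  # length of a piece
--     counter = 0  # number of pieces
--     for elem in diff:
--         length += elem
--         if length >= m:
--             length = 0
--             counter += 1
--
--     return counter
--
-- def general_bisect(diff, k, l):
--     """
--     general bisect (https://qiita.com/drken/items/97e37dd6143e33a64c8c)
--     """
--     left = -1
--     right = l + 1
--
--     while right - left > 1: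
--         # start asking questions by checking if the middle value can be the answer
--         middle = (right + left) // 2
--
--         # this defines the general condition
--         if (
--             divide(middle, diff) >= k + 1
--         ):  # which means you can widen the length candidate
--             left = middle  # the answer is in the right half
--         else:  # which means you need to shorten the candidate
--             right = middle  # the answer is in the left half
--
--     return left
-- ===== SOURCE B (Python) =====
-- def general_bisect(diff, k, l):
--     def can(m):
--         total, count = 0, 0
--         for x in diff:
--             total += x
--             if total >= m:
--                 total, count = 0, count + 1
--         return count > k
--
--     def search(pred, left, right):
--         if right - left <= 1:
--             return left
--         middle = (right + left) // 2
--         if pred(middle):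
--             return search(pred, middle, right)
--         return search(pred, left, middle)
--
--     return search(can, -1, l + 1)
-- ===== Notes on version B (the rewrite author's own statement) =====
-- stated objective: alternative
-- what changed: Replaces the explicit while-loop with sentinel state by a higher-order divide-and-conquer recursion over the interval, parameterised by a boolean predicate that fuses the divide helper and the k+1 comparison into a single closure.
import Mathlib
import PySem

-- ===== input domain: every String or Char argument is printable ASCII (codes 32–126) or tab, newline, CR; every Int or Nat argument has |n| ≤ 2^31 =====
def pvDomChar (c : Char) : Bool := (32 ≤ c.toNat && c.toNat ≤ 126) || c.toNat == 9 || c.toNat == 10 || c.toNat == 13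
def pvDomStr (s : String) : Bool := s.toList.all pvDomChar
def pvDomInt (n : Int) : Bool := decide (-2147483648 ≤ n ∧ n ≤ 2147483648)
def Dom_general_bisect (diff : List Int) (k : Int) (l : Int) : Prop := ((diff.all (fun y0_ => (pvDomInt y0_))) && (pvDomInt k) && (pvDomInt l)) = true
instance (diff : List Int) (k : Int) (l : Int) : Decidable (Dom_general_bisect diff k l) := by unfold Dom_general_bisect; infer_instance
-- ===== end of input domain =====

-- B replaces A's explicit while-loop by a predicate-parameterised divide-and-conquer
-- recursion over the interval, fusing the divide helper into a boolean closure (alternative decomposition).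


-- midpoint bounds used by the termination proofs of both ports (cited by name in decreasing_by)
theorem pvMidLt {left right : Int} (h : right - left > 1) :
    (right - PySem.Int.floordiv (right + left) 2).toNat < (right - left).toNat ∧
      (PySem.Int.floordiv (right + left) 2 - left).toNat < (right - left).toNat := by
  have h1 := (PySem.Int.le_floordiv_iff_mul_le (a := right + left) (b := 2) (q := left + 1) (by omega)).mpr (by omega)
  have h2 := (PySem.Int.floordiv_lt_iff_lt_mul (a := right + left) (b := 2) (q := right) (by omega)).mpr (by omega)
  omega

-- ===== PORT A =====
-- A's divide: fold over diff carrying (length, counter), resetting length at each cut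
def divideA (m : Int) (diff : List Int) : Int :=
  (diff.foldl
    (fun (s : Int × Int) elem =>
      let length := s.1 + elem
      if length ≥ m then (0, s.2 + 1) else (length, s.2))
    (0, 0)).2

-- A's while loop, as recursion on the shrinking gap right - left
def bisectLoopA (diff : List Int) (k : Int) (left right : Int) : Int :=
  if _h : right - left > 1 then
    let middle := PySem.Int.floordiv (right + left) 2
    if divideA middle diff ≥ k + 1 then
      bisectLoopA diff k middle right
    else
      bisectLoopA diff k left middle
  else
    left
termination_by (right - left).toNat
decreasing_by
  · exact (pvMidLt (by omega)).1
  · exact (pvMidLt (by omega)).2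

def general_bisect (diff : List Int) (k : Int) (l : Int) : Int :=
  bisectLoopA diff k (-1) (l + 1)

-- ===== PORT B =====
-- B's search: divide-and-conquer recursion over the interval, generic in the predicate
def searchB (pred : Int → Bool) (left right : Int) : Int :=
  if _h : right - left ≤ 1 then
    left
  else
    let middle := PySem.Int.floordiv (right + left) 2
    if pred middle then
      searchB pred middle right
    else
      searchB pred left middle
termination_by (right - left).toNat
decreasing_by
  · exact (pvMidLt (by omega)).1
  · exact (pvMidLt (by omega)).2

def general_bisect_alt (diff : List Int) (k : Int) (l : Int) : Int :=
  let can : Int → Bool := fun m =>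
    let s :=
      diff.foldl
        (fun (p : Int × Int) x =>
          let total := p.1 + x
          if total ≥ m then (0, p.2 + 1) else (total, p.2))
        (0, 0)
    decide (s.2 > k)
  searchB can (-1) (l + 1)

-- ===== PRECONDITION & SPEC =====
def Spec_general_bisect (diff : List Int) (k : Int) (l : Int) (out : Int) : Prop := out = general_bisect_alt diff k l
instance (diff : List Int) (k : Int) (l : Int) (out : Int) : Decidable (Spec_general_bisect diff k l out) := by unfold Spec_general_bisect; infer_instance

-- ===== CLAIM (what is proved, stated in full; the proofs are below) =====
def Claim_equal_general_bisect : Prop := ∀ (diff : List Int) (k : Int) (l : Int), Dom_general_bisect diff k l → Spec_general_bisect diff k l (general_bisect diff k l)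

-- ===== LEMMAS AND PROOFS =====
theorem loopA_eq_searchB (diff : List Int) (k : Int) (left right : Int) :
    bisectLoopA diff k left right =
      searchB (fun m => decide
        ((diff.foldl
          (fun (p : Int × Int) x =>
            let total := p.1 + x
            if total ≥ m then (0, p.2 + 1) else (total, p.2))
          (0, 0)).2 > k)) left right := by
  rw [bisectLoopA, searchB]
  dsimp only []
  by_cases hg : right - left > 1
  · rw [dif_pos hg, dif_neg (by omega : ¬ right - left ≤ 1)]
    by_cases hd : divideA (PySem.Int.floordiv (right + left) 2) diff ≥ k + 1
    · rw [if_pos hd, if_pos (by rw [decide_eq_true_iff]; exact Int.lt_iff_add_one_le.mpr hd)]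
      exact loopA_eq_searchB diff k _ right
    · rw [if_neg hd, if_neg (by rw [decide_eq_true_iff]; exact fun hlt => hd (Int.lt_iff_add_one_le.mp hlt))]
      exact loopA_eq_searchB diff k left _
  · rw [dif_neg hg, dif_pos (by omega : right - left ≤ 1)]
termination_by (right - left).toNat
decreasing_by
  · exact (pvMidLt (by omega)).1
  · exact (pvMidLt (by omega)).2

-- ===== VERDICT (by name: the statement is the Claim_ definition above) =====
theorem general_bisect_spec : Claim_equal_general_bisect := by
  intro diff k l _
  unfold Spec_general_bisect general_bisect general_bisect_alt
  exact loopA_eq_searchB diff k (-1) (l + 1)
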